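-- pv_equiv track=rewrite | github.com/ASolidBPlus/titantron | backend/app/services/cagematch_scraper.py | _determine_side
-- ===== SOURCE A (Python) =====
-- def _determine_side(name: str, sides_text: list[str]) -> int:
--     """Determine which side (1-indexed) a wrestler is on based on result text.
--
--     Supports N-way matches (three-way, four-way gauntlet, etc.) by checking
--     each chunk from the 'vs.' split.
--     """
--     if len(sides_text) < 2:
--         return 1
--     # Check which chunk contains this name (exact match first)
--     for i, chunk in enumerate(sides_text):
--         if name in chunk:
--             return i + 1
--     # Case-insensitive fallback
--     name_lower = name.lower()
--     for i, chunk in enumerate(sides_text):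
--         if name_lower in chunk.lower():
--             return i + 1
--     return 1  # default
-- ===== SOURCE B (Python) =====
-- def _determine_side(name: str, sides_text: list[str]) -> int:
--     """Single pass: exact hit returns immediately; first case-insensitive
--     hit is recorded as a fallback and used only after the loop."""
--     if len(sides_text) < 2:
--         return 1
--     name_lower = name.lower()
--     fallback = None
--     for i, chunk in enumerate(sides_text):
--         if name in chunk:
--             return i + 1
--         if fallback is None and name_lower in chunk.lower():
--             fallback = i + 1
--     return fallback if fallback is not None else 1
-- ===== Notes on version B (the rewrite author's own statement) =====
-- stated objective: simpler
-- what changed: Replaces A's two sequential scans (exact scan, then a full case-insensitive rescan) with one loop that returns on an exact hit and records the first case-insensitive hit as a post-loop fallback.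
import Mathlib
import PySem

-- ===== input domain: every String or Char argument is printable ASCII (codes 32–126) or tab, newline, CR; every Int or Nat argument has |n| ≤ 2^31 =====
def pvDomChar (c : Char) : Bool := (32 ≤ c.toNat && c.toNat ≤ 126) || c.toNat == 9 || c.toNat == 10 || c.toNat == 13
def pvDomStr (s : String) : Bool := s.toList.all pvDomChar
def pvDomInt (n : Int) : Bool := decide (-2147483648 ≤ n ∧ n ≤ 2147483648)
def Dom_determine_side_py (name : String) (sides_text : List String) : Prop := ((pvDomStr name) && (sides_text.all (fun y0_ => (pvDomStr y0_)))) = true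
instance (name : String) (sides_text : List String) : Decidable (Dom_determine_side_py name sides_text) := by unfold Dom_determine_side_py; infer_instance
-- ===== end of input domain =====

-- B: one loop with a recorded case-insensitive fallback instead of A's two sequential scans (simpler decomposition).
-- ===== PORT A =====
-- first loop of A: exact substring scan, returning i+1 at the first hit
def pvFindExact : List String → String → Int → Option Int
  | [], _, _ => none
  | c :: rest, name, i =>
    if PySem.Str.isIn name c then some (i + 1) else pvFindExact rest name (i + 1)

-- second loop of A: case-insensitive scan with the pre-lowered name
def pvFindCI : List String → String → Int → Option Int
  | [], _, _ => none
  | c :: rest, nl, i =>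
    if PySem.Str.isIn nl (PySem.Str.lower c) then some (i + 1) else pvFindCI rest nl (i + 1)

def determine_side_py (name : String) (sides_text : List String) : Int :=
  if sides_text.length < 2 then 1
  else
    match pvFindExact sides_text name 0 with
    | some r => r
    | none =>
      match pvFindCI sides_text (PySem.Str.lower name) 0 with
      | some r => r
      | none => 1

-- ===== PORT B =====
-- B's single loop: early return on exact hit, first case-insensitive hit kept as fallback
def pvScanB : List String → String → String → Int → Option Int → Int
  | [], _, _, _, fb => fb.getD 1
  | c :: rest, name, nl, i, fb =>
    if PySem.Str.isIn name c then i + 1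
    else pvScanB rest name nl (i + 1)
      (if fb.isNone && PySem.Str.isIn nl (PySem.Str.lower c) then some (i + 1) else fb)

def determine_side_py_alt (name : String) (sides_text : List String) : Int :=
  if sides_text.length < 2 then 1
  else pvScanB sides_text name (PySem.Str.lower name) 0 none

-- ===== PRECONDITION & SPEC =====
def Spec_determine_side_py (name : String) (sides_text : List String) (out : Int) : Prop := out = determine_side_py_alt name sides_text
instance (name : String) (sides_text : List String) (out : Int) : Decidable (Spec_determine_side_py name sides_text out) := by unfold Spec_determine_side_py; infer_instance

-- ===== CLAIM (what is proved, stated in full; the proofs are below) =====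
def Claim_equal_determine_side_py : Prop := ∀ (name : String) (sides_text : List String), Dom_determine_side_py name sides_text → Spec_determine_side_py name sides_text (determine_side_py name sides_text)

-- ===== LEMMAS AND PROOFS =====

-- ===== VERDICT (by name: the statement is the Claim_ definition above) =====
-- B's scan equals A's two scans with the fallback resolved after the loop
theorem pvScanB_eq (xs : List String) (name nl : String) (i : Int) (fb : Option Int) :
    pvScanB xs name nl i fb =
      match pvFindExact xs name i with
      | some r => r
      | none => (fb.orElse (fun _ => pvFindCI xs nl i)).getD 1 := by
  induction xs generalizing i fb with
  | nil => cases fb <;> simp [pvScanB, pvFindExact, pvFindCI, Option.orElse]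
  | cons c rest ih =>
    by_cases hx : PySem.Chars.isIn name.toList c.toList = true
    · simp [pvScanB, pvFindExact, hx]
    · by_cases hc : PySem.Chars.isIn nl.toList (PySem.Chars.lower c.toList) = true <;>
        cases fb <;>
          simp [pvScanB, pvFindExact, pvFindCI, hx, hc, ih, Option.orElse]

theorem determine_side_py_spec : Claim_equal_determine_side_py := by
  intro name sides_text _
  unfold Spec_determine_side_py determine_side_py determine_side_py_alt
  by_cases h : sides_text.length < 2
  · simp [h]
  · simp only [h, if_false]
    rw [pvScanB_eq]
    cases h1 : pvFindExact sides_text name 0 <;>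
      cases h2 : pvFindCI sides_text (PySem.Str.lower name) 0 <;>
        simp [h1, h2, Option.orElse]
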